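-- pv_equiv track=rewrite | github.com/bengordon-dev/math-scripts | function-estimation/euler-number/e-fraction-estimation.py | est
-- ===== SOURCE A (Python) =====
-- def fac(n):
--     out, i = 1, 2
--     while i <= n:
--         out *= i
--         i += 1
--     return out
--
-- def est(s): # returns an integer fraction approximating e
--     sfac = fac(s)
--     out = [sfac, sfac]
--     t = out[0]
--     for j in range(1, s+1):
--         t //= j
--         out[0] += t
--     return out
-- ===== SOURCE B (Python) =====
-- def est(s): # returns an integer fraction approximating e
--     num = 1
--     den = 1
--     for i in range(1, s + 1):
--         num = i * num + 1   # Horner: num = sum_{k=0}^{i} i!/k!, built by multiplying up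
--         den *= i            # running-product factorial
--     return [num, den]
-- ===== Notes on version B (the rewrite author's own statement) =====
-- stated objective: simpler
-- what changed: Replaces the divide-down pass (t //= j over a precomputed factorial) plus the separate fac helper with one forward loop maintaining the numerator by the Horner recurrence N = i*N + 1 and the denominator as a running product, using no division at all.
import Mathlib
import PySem

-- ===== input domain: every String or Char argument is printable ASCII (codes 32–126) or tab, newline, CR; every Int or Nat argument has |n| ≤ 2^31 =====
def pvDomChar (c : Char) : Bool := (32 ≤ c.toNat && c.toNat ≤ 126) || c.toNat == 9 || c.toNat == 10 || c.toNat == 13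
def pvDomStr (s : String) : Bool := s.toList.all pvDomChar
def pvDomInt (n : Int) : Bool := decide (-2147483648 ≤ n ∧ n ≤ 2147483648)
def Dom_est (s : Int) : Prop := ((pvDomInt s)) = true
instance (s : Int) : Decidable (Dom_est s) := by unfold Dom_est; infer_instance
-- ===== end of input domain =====

-- B replaces A's divide-down pass over a precomputed factorial by a division-free
-- forward Horner recurrence with a running-product denominator (objective: simpler).

-- ===== PORT A =====
-- fac's while loop: while i <= n: out *= i; i += 1
def facAux (n i out : Int) : Int :=
  if _h : i ≤ n then facAux n (i + 1) (out * i) else out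
termination_by (n + 1 - i).toNat
decreasing_by omega

def fac (n : Int) : Int := facAux n 2 1

def est (s : Int) : List Int :=
  let sfac := fac s
  let p := (PySem.List.pyRange 1 (s + 1) 1).foldl
    (fun (st : Int × Int) j =>
      let t := PySem.Int.floordiv st.1 j
      (t, st.2 + t)) (sfac, sfac)
  [p.2, sfac]

-- ===== PORT B =====
def est_alt (s : Int) : List Int :=
  let p := (PySem.List.pyRange 1 (s + 1) 1).foldl
    (fun (st : Int × Int) i => (i * st.1 + 1, st.2 * i)) (1, 1)
  [p.1, p.2]

-- ===== PRECONDITION & SPEC =====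
def Spec_est (s : Int) (out : List Int) : Prop := out = est_alt s
instance (s : Int) (out : List Int) : Decidable (Spec_est s out) := by unfold Spec_est; infer_instance

-- ===== CLAIM (what is proved, stated in full; the proofs are below) =====
def Claim_equal_est : Prop := ∀ (s : Int), Dom_est s → Spec_est s (est s)

-- ===== LEMMAS AND PROOFS =====

-- hornerE n = sum_{k=0}^n n!/k!, the common numerator
def hornerE : Nat → Int
  | 0 => 1
  | n + 1 => ((n : Int) + 1) * hornerE n + 1

theorem facAux_spec (n i out : Int) :
    facAux n i out = (PySem.List.pyRange i (n + 1) 1).foldl (· * ·) out := by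
  rw [facAux]
  split
  · rw [PySem.List.pyRange_one_cons (by omega), List.foldl_cons]
    exact facAux_spec n (i + 1) (out * i)
  · rw [PySem.List.pyRange_one_eq_nil (by omega), List.foldl_nil]
termination_by (n + 1 - i).toNat
decreasing_by omega

theorem rangeNat (n : Nat) :
    PySem.List.pyRange 1 ((n : Int) + 1) 1
      = (List.range n).map (fun (k : Nat) => 1 + (k : Int)) := by
  induction n with
  | zero => simp [PySem.List.pyRange_one_eq_nil]
  | succ n ih =>
      have h : ((n + 1 : Nat) : Int) + 1 = ((n : Int) + 1) + 1 := by push_cast; ring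
      rw [h, PySem.List.pyRange_one_succ_right (by omega), ih, List.range_succ, List.map_append]
      simp
      ring

theorem prodfold (n : Nat) (c : Int) :
    ((List.range n).map (fun (k : Nat) => 1 + (k : Int))).foldl (· * ·) c
      = c * (n.factorial : Int) := by
  induction n generalizing c with
  | zero => simp
  | succ n ih =>
      rw [List.range_succ, List.map_append, List.foldl_append, ih]
      simp only [List.map_cons, List.map_nil, List.foldl_cons, List.foldl_nil, Nat.factorial_succ]
      push_cast
      ring

theorem altfold (n : Nat) :
    ((List.range n).map (fun (k : Nat) => 1 + (k : Int))).foldl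
      (fun (st : Int × Int) i => (i * st.1 + 1, st.2 * i)) (1, 1)
      = (hornerE n, (n.factorial : Int)) := by
  induction n with
  | zero => simp [hornerE]
  | succ n ih =>
      rw [List.range_succ, List.map_append, List.foldl_append, ih]
      simp only [List.map_cons, List.map_nil, List.foldl_cons, List.foldl_nil,
        hornerE, Nat.factorial_succ, Prod.mk.injEq]
      refine ⟨by ring, by push_cast; ring⟩

theorem afold (n : Nat) (c acc : Int) :
    ((List.range n).map (fun (k : Nat) => 1 + (k : Int))).foldl
      (fun (st : Int × Int) j =>
        let t := PySem.Int.floordiv st.1 j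
        (t, st.2 + t)) (c * (n.factorial : Int), acc)
      = (c, acc + c * (hornerE n - (n.factorial : Int))) := by
  induction n generalizing c acc with
  | zero => simp [hornerE]
  | succ n ih =>
      rw [List.range_succ, List.map_append]
      have hfac : c * (((n + 1).factorial : Nat) : Int)
          = (c * ((n : Int) + 1)) * (n.factorial : Int) := by
        simp [Nat.factorial_succ]; push_cast; ring
      rw [List.foldl_append, hfac, ih]
      simp only [List.foldl_cons, List.foldl_nil, List.map_cons, List.map_nil]
      have hdiv : PySem.Int.floordiv (c * ((n : Int) + 1)) (1 + (n : Int)) = c := by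
        rw [PySem.Int.floordiv_eq_ediv_of_pos (by omega)]
        rw [show c * ((n : Int) + 1) = c * (1 + (n : Int)) by ring]
        exact Int.mul_ediv_cancel c (by omega)
      simp only [hdiv, Prod.mk.injEq]
      refine ⟨trivial, ?_⟩
      simp only [hornerE, Nat.factorial_succ]
      push_cast [Nat.factorial_succ]
      ring

theorem fac_eq (n : Nat) : fac ((n : Int)) = (n.factorial : Int) := by
  unfold fac
  rw [facAux_spec]
  cases n with
  | zero => rw [PySem.List.pyRange_one_eq_nil (by omega)]; simp
  | succ m =>
      have key : (PySem.List.pyRange 1 (((m + 1 : Nat) : Int) + 1) 1).foldl (· * ·) (1 : Int)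
          = (PySem.List.pyRange 2 (((m + 1 : Nat) : Int) + 1) 1).foldl (· * ·) (1 : Int) := by
        rw [PySem.List.pyRange_one_cons (show (1 : Int) < ((m + 1 : Nat) : Int) + 1 by push_cast; omega),
          List.foldl_cons]
        rw [show (1 : Int) * 1 = 1 by norm_num, show (1 : Int) + 1 = 2 by norm_num]
      rw [← key, rangeNat, prodfold]
      ring

-- ===== VERDICT (by name: the statement is the Claim_ definition above) =====
theorem est_spec : Claim_equal_est := by
  intro s _
  show est s = est_alt s
  by_cases hs : 0 ≤ s
  · obtain ⟨n, rfl⟩ : ∃ n : Nat, s = (n : Int) := ⟨s.toNat, by omega⟩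
    unfold est est_alt
    simp only [fac_eq, rangeNat, altfold]
    have h := afold n 1 ((n.factorial : Int))
    simp only [one_mul] at h
    simp only [h]
    simp
  · have hnil : PySem.List.pyRange 1 (s + 1) 1 = [] :=
      PySem.List.pyRange_one_eq_nil (by omega)
    have hfac : fac s = 1 := by
      unfold fac; rw [facAux]; simp [show ¬ (2 ≤ s) by omega]
    unfold est est_alt
    simp only [hnil, hfac, List.foldl_nil]
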